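-- pv_equiv track=rewrite | github.com/Asutherland8219/TMU_assignments | Source/labs109.py | count_growlers
-- ===== SOURCE A (Python) =====
-- def count_growlers(animals):
--   growlers = 0
--
--   for animalIndex in range(len(animals)):
--     if (animals[animalIndex] == "cat") or (animals[animalIndex] == "dog"):  # look left
--       Cats = 0
--       Dogs = 0
--       for subAI in range(0, animalIndex):
--         if (animals[subAI] == "cat") or (animals[subAI] == "tac"):
--           Cats +=1
--         elif (animals[subAI] == "dog") or (animals[subAI] == "god"):
--           Dogs +=1
--       if (Dogs > Cats):
--         growlers += 1
--
--     elif (animals[animalIndex] == "tac") or (animals[animalIndex] == "god"): # look right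
--       Cats = 0
--       Dogs = 0
--       for subAI in range(animalIndex+1, len(animals)):
--         if (animals[subAI] == "cat") or (animals[subAI] == "tac"):
--           Cats +=1
--         elif (animals[subAI] == "dog") or (animals[subAI] == "god"):
--           Dogs +=1
--       if (Dogs > Cats):
--         growlers += 1
--
--
--   return growlers
-- ===== SOURCE B (Python) =====
-- def count_growlers(animals):
--     total_cats = sum(1 for a in animals if a == "cat" or a == "tac")
--     total_dogs = sum(1 for a in animals if a == "dog" or a == "god")
--     left_cats = 0
--     left_dogs = 0
--     growlers = 0
--     for a in animals:
--         if a == "cat" or a == "dog":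
--             if left_dogs > left_cats:
--                 growlers += 1
--         elif a == "tac" or a == "god":
--             right_cats = total_cats - left_cats - (1 if a == "tac" else 0)
--             right_dogs = total_dogs - left_dogs - (1 if a == "god" else 0)
--             if right_dogs > right_cats:
--                 growlers += 1
--         if a == "cat" or a == "tac":
--             left_cats += 1
--         elif a == "dog" or a == "god":
--             left_dogs += 1
--     return growlers
-- ===== Notes on version B (the rewrite author's own statement) =====
-- stated objective: alternative
-- what changed: Replaced the per-animal rescan of the prefix/suffix with a single pass that keeps running left-side cat/dog counts and derives right-side counts from precomputed totals; worst-case quadratic rescans disappear, though on keyword-sparse inputs measured time is comparable.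
import Mathlib
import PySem

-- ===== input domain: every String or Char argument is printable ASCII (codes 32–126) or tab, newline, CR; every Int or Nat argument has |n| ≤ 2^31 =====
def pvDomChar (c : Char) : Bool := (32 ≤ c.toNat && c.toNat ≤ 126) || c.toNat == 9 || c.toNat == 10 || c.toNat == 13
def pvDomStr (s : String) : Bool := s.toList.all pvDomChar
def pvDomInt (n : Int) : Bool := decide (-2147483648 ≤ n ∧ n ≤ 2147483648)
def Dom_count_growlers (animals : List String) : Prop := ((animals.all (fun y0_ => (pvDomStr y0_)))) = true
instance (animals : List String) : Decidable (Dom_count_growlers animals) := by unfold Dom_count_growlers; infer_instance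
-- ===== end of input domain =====

-- B replaces A's per-animal rescan of the prefix/suffix with a single pass keeping running
-- left-side cat/dog counts and deriving right-side counts from precomputed totals (objective: alternative).


-- ===== PORT A =====
-- A's two identical inner counting loops share this loop body.
def pvLookCount (cd : Int × Int) (s : String) : Int × Int :=
  if s == "cat" || s == "tac" then (cd.1 + 1, cd.2)
  else if s == "dog" || s == "god" then (cd.1, cd.2 + 1)
  else cd

def count_growlers (animals : List String) : Int :=
  (PySem.List.pyRange 0 (PySem.List.len animals)).foldl (fun growlers animalIndex =>
    let a := PySem.List.pyGetD animals animalIndex ""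
    if a == "cat" || a == "dog" then
      let cd := (PySem.List.pyRange 0 animalIndex).foldl
        (fun cd subAI => pvLookCount cd (PySem.List.pyGetD animals subAI "")) ((0 : Int), (0 : Int))
      if cd.2 > cd.1 then growlers + 1 else growlers
    else if a == "tac" || a == "god" then
      let cd := (PySem.List.pyRange (animalIndex + 1) (PySem.List.len animals)).foldl
        (fun cd subAI => pvLookCount cd (PySem.List.pyGetD animals subAI "")) ((0 : Int), (0 : Int))
      if cd.2 > cd.1 then growlers + 1 else growlers
    else growlers) 0

-- ===== PORT B =====
def pvStepB (tc td : Int) (st : Int × Int × Int) (a : String) : Int × Int × Int :=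
  let lc := st.1
  let ld := st.2.1
  let g := st.2.2
  let g' :=
    if a == "cat" || a == "dog" then (if ld > lc then g + 1 else g)
    else if a == "tac" || a == "god" then
      let rc := tc - lc - (if a == "tac" then 1 else 0)
      let rd := td - ld - (if a == "god" then 1 else 0)
      (if rd > rc then g + 1 else g)
    else g
  let lc' := if a == "cat" || a == "tac" then lc + 1 else lc
  let ld' := if a == "dog" || a == "god" then ld + 1 else ld
  (lc', ld', g')

def count_growlers_alt (animals : List String) : Int :=
  let totalCats : Int := ((animals.countP fun a => a == "cat" || a == "tac" : Nat) : Int)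
  let totalDogs : Int := ((animals.countP fun a => a == "dog" || a == "god" : Nat) : Int)
  (animals.foldl (pvStepB totalCats totalDogs) (0, 0, 0)).2.2

-- ===== PRECONDITION & SPEC =====
def Spec_count_growlers (animals : List String) (out : Int) : Prop := out = count_growlers_alt animals
instance (animals : List String) (out : Int) : Decidable (Spec_count_growlers animals out) := by unfold Spec_count_growlers; infer_instance

-- ===== CLAIM (what is proved, stated in full; the proofs are below) =====
def Claim_equal_count_growlers : Prop := ∀ (animals : List String), Dom_count_growlers animals → Spec_count_growlers animals (count_growlers animals)

-- ===== LEMMAS AND PROOFS =====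

-- cats/dogs visible from either side, as counted by A's inner loops
def catsI (xs : List String) : Int := ((xs.countP fun s => s == "cat" || s == "tac" : Nat) : Int)
def dogsI (xs : List String) : Int := ((xs.countP fun s => s == "dog" || s == "god" : Nat) : Int)

theorem catsI_append (xs ys : List String) : catsI (xs ++ ys) = catsI xs + catsI ys := by
  simp [catsI, List.countP_append]

theorem dogsI_append (xs ys : List String) : dogsI (xs ++ ys) = dogsI xs + dogsI ys := by
  simp [dogsI, List.countP_append]

theorem catsI_cons (a : String) (xs : List String) :
    catsI (a :: xs) = (if a == "cat" || a == "tac" then 1 else 0) + catsI xs := by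
  simp only [catsI, List.countP_cons]
  split_ifs with h
  · push_cast; ring
  · simp

theorem dogsI_cons (a : String) (xs : List String) :
    dogsI (a :: xs) = (if a == "dog" || a == "god" then 1 else 0) + dogsI xs := by
  simp only [dogsI, List.countP_cons]
  split_ifs with h
  · push_cast; ring
  · simp

-- A's inner counting loop computes (cats, dogs) of the scanned segment
theorem lookCount_foldl (xs : List String) (p : Int × Int) :
    xs.foldl pvLookCount p = (p.1 + catsI xs, p.2 + dogsI xs) := by
  induction xs generalizing p with
  | nil => simp [catsI, dogsI]
  | cons a rest ih =>
    rw [List.foldl_cons, ih, catsI_cons, dogsI_cons]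
    by_cases hc : a = "cat" <;> by_cases ht : a = "tac" <;>
      by_cases hd : a = "dog" <;> by_cases hg : a = "god" <;>
      simp_all [pvLookCount] <;> ring_nf

-- structural form of A: contribution of each animal given its prefix and suffix
def aspec (pre : List String) : List String → Int
  | [] => 0
  | a :: rest =>
    (if a == "cat" || a == "dog" then (if dogsI pre > catsI pre then 1 else 0)
     else if a == "tac" || a == "god" then (if dogsI rest > catsI rest then 1 else 0)
     else 0) + aspec (pre ++ [a]) rest

-- structural form of B: contribution given running left counts and totals
def bspec (tc td lc ld : Int) : List String → Int
  | [] => 0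
  | a :: rest =>
    (if a == "cat" || a == "dog" then (if ld > lc then 1 else 0)
     else if a == "tac" || a == "god" then
       (if td - ld - (if a == "god" then 1 else 0) > tc - lc - (if a == "tac" then 1 else 0)
        then 1 else 0)
     else 0)
    + bspec tc td (if a == "cat" || a == "tac" then lc + 1 else lc)
        (if a == "dog" || a == "god" then ld + 1 else ld) rest

def outerStepA (animals : List String) (growlers : Int) (animalIndex : Int) : Int :=
  let a := PySem.List.pyGetD animals animalIndex ""
  if a == "cat" || a == "dog" then
    let cd := (PySem.List.pyRange 0 animalIndex).foldl
      (fun cd subAI => pvLookCount cd (PySem.List.pyGetD animals subAI "")) ((0 : Int), (0 : Int))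
    if cd.2 > cd.1 then growlers + 1 else growlers
  else if a == "tac" || a == "god" then
    let cd := (PySem.List.pyRange (animalIndex + 1) (PySem.List.len animals)).foldl
      (fun cd subAI => pvLookCount cd (PySem.List.pyGetD animals subAI "")) ((0 : Int), (0 : Int))
    if cd.2 > cd.1 then growlers + 1 else growlers
  else growlers

theorem count_growlers_eq_outer (animals : List String) :
    count_growlers animals
      = (PySem.List.pyRange 0 (PySem.List.len animals)).foldl (outerStepA animals) 0 := rfl

-- prefix scan over pyRange 0 |pre| of (pre ++ xs) counts exactly pre
theorem prefix_fold (pre xs : List String) :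
    (PySem.List.pyRange 0 ((pre.length : Int))).foldl
      (fun cd subAI => pvLookCount cd (PySem.List.pyGetD (pre ++ xs) subAI "")) ((0 : Int), (0 : Int))
      = (catsI pre, dogsI pre) := by
  have hcongr : (PySem.List.pyRange 0 ((pre.length : Int))).foldl
      (fun cd subAI => pvLookCount cd (PySem.List.pyGetD (pre ++ xs) subAI "")) ((0 : Int), (0 : Int))
      = (PySem.List.pyRange 0 ((pre.length : Int))).foldl
      (fun cd subAI => pvLookCount cd (PySem.List.pyGetD pre subAI "")) ((0 : Int), (0 : Int)) := by
    apply PySem.List.foldl_congr_mem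
    intro acc j hj
    rw [PySem.List.mem_pyRange_one] at hj
    have hjl : j < (pre.length : Int) := hj.2
    have h1 : j < ((pre ++ xs).length : Int) := by simp; omega
    rw [PySem.List.pyGetD_eq_getElem _ _ hj.1 h1, PySem.List.pyGetD_eq_getElem _ _ hj.1 hjl]
    congr 1
    exact List.getElem_append_left (by omega)
  rw [hcongr, PySem.List.foldl_pyRange_zero_pyGetD' pre "" pvLookCount, lookCount_foldl]
  simp

theorem bridgeA (xs : List String) : ∀ (pre : List String) (g : Int),
    (PySem.List.pyRange ((pre.length : Int)) (PySem.List.len (pre ++ xs))).foldl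
      (outerStepA (pre ++ xs)) g = g + aspec pre xs := by
  induction xs with
  | nil =>
    intro pre g
    rw [PySem.List.pyRange_one_eq_nil (by simp [PySem.List.len_eq])]
    simp [aspec]
  | cons a rest ih =>
    intro pre g
    have hlen : PySem.List.len (pre ++ a :: rest) = (pre.length : Int) + 1 + (rest.length : Int) := by
      simp [PySem.List.len_eq]; omega
    have hlt : (pre.length : Int) < PySem.List.len (pre ++ a :: rest) := by rw [hlen]; omega
    rw [PySem.List.pyRange_one_cons hlt, List.foldl_cons]
    -- evaluate the body at index |pre|
    have hget : PySem.List.pyGetD (pre ++ a :: rest) ((pre.length : Int)) "" = a := by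
      rw [PySem.List.pyGetD_eq_getElem _ _ (by positivity) (by simp)]
      simp
    have hsuf : (PySem.List.pyRange ((pre.length : Int) + 1) (PySem.List.len (pre ++ a :: rest))).foldl
        (fun cd subAI => pvLookCount cd (PySem.List.pyGetD (pre ++ a :: rest) subAI "")) ((0 : Int), (0 : Int))
        = (catsI rest, dogsI rest) := by
      have := PySem.List.foldl_pyRange_pyGetD (pre ++ a :: rest) ""
        pvLookCount ((0 : Int), (0 : Int)) (a := (pre.length : Int) + 1) (by positivity)
      rw [this]
      have hdrop : List.drop ((pre.length : Int) + 1).toNat (pre ++ a :: rest) = rest := by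
        have h : ((pre.length : Int) + 1).toNat = pre.length + 1 := by omega
        rw [h, List.drop_append]
        simp
      rw [hdrop, lookCount_foldl]
      simp
    have hbody : outerStepA (pre ++ a :: rest) g ((pre.length : Int))
        = g + (if a == "cat" || a == "dog" then (if dogsI pre > catsI pre then 1 else 0)
               else if a == "tac" || a == "god" then (if dogsI rest > catsI rest then 1 else 0)
               else 0) := by
      unfold outerStepA
      rw [hget]
      by_cases h1 : (a == "cat" || a == "dog") = true
      · simp only [h1, if_pos]
        rw [prefix_fold pre (a :: rest)]
        split_ifs <;> simp_all
      · by_cases h2 : (a == "tac" || a == "god") = true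
        · simp only [h1, h2, if_neg, if_pos, Bool.false_eq_true, not_false_iff]
          rw [hsuf]
          split_ifs <;> simp_all
        · simp [h1, h2]
    have hrest := ih (pre ++ [a]) (outerStepA (pre ++ a :: rest) g ((pre.length : Int)))
    rw [List.append_assoc] at hrest
    simp only [List.singleton_append] at hrest
    have hlen2 : ((pre ++ [a]).length : Int) = (pre.length : Int) + 1 := by simp
    rw [hlen2] at hrest
    rw [hrest, hbody, aspec]
    ring

-- aspec equals bspec once the left counts and totals line up
theorem aspec_eq_bspec (xs : List String) : ∀ (pre : List String) (tc td : Int),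
    tc = catsI (pre ++ xs) → td = dogsI (pre ++ xs) →
    aspec pre xs = bspec tc td (catsI pre) (dogsI pre) xs := by
  induction xs with
  | nil => intro pre tc td _ _; simp [aspec, bspec]
  | cons a rest ih =>
    intro pre tc td htc htd
    rw [aspec, bspec]
    have hc : tc = catsI pre + (if a == "cat" || a == "tac" then 1 else 0) + catsI rest := by
      rw [htc, catsI_append, catsI_cons]; ring
    have hd : td = dogsI pre + (if a == "dog" || a == "god" then 1 else 0) + dogsI rest := by
      rw [htd, dogsI_append, dogsI_cons]; ring
    have hrec : aspec (pre ++ [a]) rest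
        = bspec tc td (if a == "cat" || a == "tac" then catsI pre + 1 else catsI pre)
            (if a == "dog" || a == "god" then dogsI pre + 1 else dogsI pre) rest := by
      have h1 : catsI (pre ++ [a]) = if a == "cat" || a == "tac" then catsI pre + 1 else catsI pre := by
        rw [catsI_append, catsI_cons]
        simp [catsI]; split_ifs <;> ring
      have h2 : dogsI (pre ++ [a]) = if a == "dog" || a == "god" then dogsI pre + 1 else dogsI pre := by
        rw [dogsI_append, dogsI_cons]
        simp [dogsI]; split_ifs <;> ring
      have := ih (pre ++ [a]) tc td
        (by rw [htc, List.append_assoc]; simp) (by rw [htd, List.append_assoc]; simp)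
      rw [this, h1, h2]
    rw [hrec]
    congr 1
    -- head contributions agree
    subst hc hd
    by_cases hca : a = "cat" <;> by_cases hta : a = "tac" <;>
      by_cases hda : a = "dog" <;> by_cases hga : a = "god" <;>
      simp_all <;> split_ifs <;> omega

-- B's fold returns bspec in its third component
theorem foldB (xs : List String) : ∀ (tc td : Int) (st : Int × Int × Int),
    (xs.foldl (pvStepB tc td) st).2.2 = st.2.2 + bspec tc td st.1 st.2.1 xs := by
  induction xs with
  | nil => intro tc td st; simp [bspec]
  | cons a rest ih =>
    intro tc td st
    rw [List.foldl_cons, ih, bspec]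
    by_cases hc : a = "cat" <;> by_cases ht : a = "tac" <;>
      by_cases hd : a = "dog" <;> by_cases hg : a = "god" <;>
      simp_all [pvStepB] <;> split_ifs <;> ring

-- ===== VERDICT (by name: the statement is the Claim_ definition above) =====
theorem count_growlers_spec : Claim_equal_count_growlers := by
  intro animals _
  unfold Spec_count_growlers
  rw [count_growlers_eq_outer]
  have hA := bridgeA animals [] 0
  simp only [List.nil_append, List.length_nil, Nat.cast_zero, zero_add] at hA
  rw [hA]
  rw [aspec_eq_bspec animals [] (catsI animals) (dogsI animals) (by simp) (by simp)]
  have hz1 : catsI ([] : List String) = 0 := by simp [catsI]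
  have hz2 : dogsI ([] : List String) = 0 := by simp [dogsI]
  rw [hz1, hz2]
  show bspec (catsI animals) (dogsI animals) 0 0 animals
      = (List.foldl (pvStepB (catsI animals) (dogsI animals)) (0, 0, 0) animals).2.2
  rw [foldB animals (catsI animals) (dogsI animals) (0, 0, 0)]
  simp
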